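-- pv_equiv track=rewrite | github.com/raissaadara/PythonPractice | PythonPractice.py | is_valid_sequence
-- ===== SOURCE A (Python) =====
-- def is_valid_sequence(dna):
--     """ (str) -> bool
--
--     Return True if and only if the DNA sequence is valid
--     (that is, it contains no characters
--     other than 'A', 'T', 'C', and 'G')
--
--     >>> is_valid_sequence('ATCGGC')
--     True
--     >>> is_valid_sequence('atcggc')
--     False
--     """
--
--     result = 0
--     for char in dna:
--         if not char in 'ATCG':
--             result = result + 1
--         else:
--             result = result
--
--     return result == 0
-- ===== SOURCE B (Python) =====
-- def is_valid_sequence(dna):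
--     """ (str) -> bool
--
--     Return True if and only if the DNA sequence is valid
--     (that is, it contains no characters
--     other than 'A', 'T', 'C', and 'G')
--     """
--     return set(dna) <= set('ATCG')
-- ===== Notes on version B (the rewrite author's own statement) =====
-- stated objective: idiomatic
-- what changed: Replaced the per-character counting loop and the result==0 check by deduplicating the string into a set and testing subset inclusion in the allowed-alphabet set.
import Mathlib
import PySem

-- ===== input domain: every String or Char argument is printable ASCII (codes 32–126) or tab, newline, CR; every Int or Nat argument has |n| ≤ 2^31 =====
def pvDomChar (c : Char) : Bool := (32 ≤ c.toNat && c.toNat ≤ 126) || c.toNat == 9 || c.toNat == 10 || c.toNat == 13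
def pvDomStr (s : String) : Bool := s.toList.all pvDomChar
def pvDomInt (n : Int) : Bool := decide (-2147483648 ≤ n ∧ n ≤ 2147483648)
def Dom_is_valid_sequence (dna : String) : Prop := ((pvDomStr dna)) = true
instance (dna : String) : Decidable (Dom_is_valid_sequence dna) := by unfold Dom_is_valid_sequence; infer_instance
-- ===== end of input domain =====

-- B replaces A's per-character counting loop by a dedup-then-subset test (idiomatic; same behaviour).

-- ===== PORT A =====
-- counter loop: result += 1 whenever char not in 'ATCG'; return result == 0
def is_valid_sequence (dna : String) : Bool :=
  let result : Int :=
    dna.toList.foldl (fun result char =>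
      if !("ATCG".toList.contains char) then result + 1 else result) 0
  result == 0

-- ===== PORT B =====
-- set(dna) <= set('ATCG')
def is_valid_sequence_alt (dna : String) : Bool :=
  PySem.Set.issubset (PySem.Set.ofList dna.toList) (PySem.Set.ofList "ATCG".toList)

-- ===== PRECONDITION & SPEC =====
def Spec_is_valid_sequence (dna : String) (out : Bool) : Prop := out = is_valid_sequence_alt dna
instance (dna : String) (out : Bool) : Decidable (Spec_is_valid_sequence dna out) := by unfold Spec_is_valid_sequence; infer_instance

-- ===== CLAIM (what is proved, stated in full; the proofs are below) =====
def Claim_equal_is_valid_sequence : Prop := ∀ (dna : String), Dom_is_valid_sequence dna → Spec_is_valid_sequence dna (is_valid_sequence dna)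

-- ===== LEMMAS AND PROOFS =====

-- A's counter over any prefix state: the foldl adds the count of bad characters to the accumulator
theorem pv_foldl_count (l : List Char) (n : Int) :
    l.foldl (fun result char =>
      if !("ATCG".toList.contains char) then result + 1 else result) n
      = n + (l.countP (fun char => !("ATCG".toList.contains char)) : Nat) := by
  induction l generalizing n with
  | nil => simp
  | cons c t ih =>
    simp only [List.foldl_cons, List.countP_cons]
    split_ifs with h
    · rw [ih]; simp; ring
    · rw [ih]; simp

theorem pv_a_iff (dna : String) :
    is_valid_sequence dna = true ↔ ∀ c ∈ dna.toList, c ∈ "ATCG".toList := by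
  unfold is_valid_sequence
  simp only [pv_foldl_count, Int.zero_add, beq_iff_eq]
  rw [show ((dna.toList.countP (fun char => !("ATCG".toList.contains char)) : Nat) : Int) = 0
        ↔ dna.toList.countP (fun char => !("ATCG".toList.contains char)) = 0 by exact_mod_cast Iff.rfl]
  rw [List.countP_eq_zero]
  constructor
  · intro h c hc
    have := h c hc
    simp at this ⊢
    tauto
  · intro h c hc
    have := h c hc
    simp at this ⊢
    tauto

theorem pv_b_iff (dna : String) :
    is_valid_sequence_alt dna = true ↔ ∀ c ∈ dna.toList, c ∈ "ATCG".toList := by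
  unfold is_valid_sequence_alt
  rw [PySem.Set.issubset_iff]
  constructor
  · intro h c hc
    have := h c (by simpa [PySem.Set.mem_ofList] using hc)
    simpa [PySem.Set.mem_ofList] using this
  · intro h c hc
    have := h c (by simpa [PySem.Set.mem_ofList] using hc)
    simpa [PySem.Set.mem_ofList] using this

-- ===== VERDICT (by name: the statement is the Claim_ definition above) =====
theorem is_valid_sequence_spec : Claim_equal_is_valid_sequence := by
  intro dna _
  unfold Spec_is_valid_sequence
  by_cases h : ∀ c ∈ dna.toList, c ∈ "ATCG".toList
  · rw [(pv_a_iff dna).mpr h, (pv_b_iff dna).mpr h]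
  · have ha := (not_iff_not.mpr (pv_a_iff dna)).mpr h
    have hb := (not_iff_not.mpr (pv_b_iff dna)).mpr h
    simp only [Bool.not_eq_true] at ha hb
    rw [ha, hb]
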